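-- pv_equiv track=rewrite | github.com/nosferathoo/generate_twine | generate_twine.py | compute_dead_ends
-- ===== SOURCE A (Python) =====
-- from collections import defaultdict, deque
--
-- def compute_dead_ends(passages, graph):
--     endings = [p for p in passages if p.startswith("Ending-")]
--     if not endings:
--         return endings, sorted(passages)
--
--     rev = defaultdict(list)
--     for src, tgts in graph.items():
--         for t in tgts:
--             rev[t].append(src)
--
--     can_reach = set(endings)
--     q = deque(endings)
--
--     while q:
--         n = q.popleft()
--         for p in rev.get(n, []):
--             if p not in can_reach:
--                 can_reach.add(p)
--                 q.append(p)
--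
--     dead = sorted(p for p in passages if p not in can_reach)
--     return endings, dead
-- ===== SOURCE B (Python) =====
-- def compute_dead_ends(passages, graph):
--     endings = [p for p in passages if p.startswith("Ending-")]
--     if not endings:
--         return endings, sorted(passages)
--
--     # Bounded fixed-point iteration, forward over graph; no reverse graph, no queue.
--     reach = set(endings)
--     for _ in range(len(graph)):
--         for src, tgts in graph.items():
--             if src not in reach and any(t in reach for t in tgts):
--                 reach.add(src)
--
--     dead = sorted(p for p in passages if p not in reach)
--     return endings, dead
-- ===== Notes on version B (the rewrite author's own statement) =====
-- stated objective: alternative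
-- what changed: Replaced the reverse-graph construction plus BFS queue by a bounded forward fixed-point iteration: sweep the graph len(graph) times, adding any source whose successor already reaches an ending; no reverse adjacency dict and no deque are built.
import Mathlib
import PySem

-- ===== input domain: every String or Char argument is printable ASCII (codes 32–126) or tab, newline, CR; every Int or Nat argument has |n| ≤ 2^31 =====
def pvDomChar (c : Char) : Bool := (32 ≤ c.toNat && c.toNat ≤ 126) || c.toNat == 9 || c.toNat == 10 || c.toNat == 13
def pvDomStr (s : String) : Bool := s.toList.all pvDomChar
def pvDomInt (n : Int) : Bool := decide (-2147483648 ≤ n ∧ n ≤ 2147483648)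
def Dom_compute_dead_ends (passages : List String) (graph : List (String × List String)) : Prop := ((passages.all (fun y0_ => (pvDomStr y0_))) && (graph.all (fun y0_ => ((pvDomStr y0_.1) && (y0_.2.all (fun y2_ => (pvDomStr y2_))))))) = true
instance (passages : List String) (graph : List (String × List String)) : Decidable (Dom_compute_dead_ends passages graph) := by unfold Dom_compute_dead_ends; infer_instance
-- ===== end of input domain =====

-- B replaces A's reverse-graph + BFS-queue reachability by a bounded forward fixed-point
-- iteration over the graph (objective: alternative algorithm of similar cost).

-- ===== PORT A =====
-- one inner-loop step of A's BFS: "if p not in can_reach: can_reach.add(p); q.append(p)"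
def pvVisit (st : PySem.Set String × List String) (p : String) : PySem.Set String × List String :=
  if p ∈ st.1 then st else (PySem.Set.add st.1 p, st.2 ++ [p])

-- lemmas cited by pvBFS's decreasing_by (termination of A's while-loop)
theorem pvLenFilterMono (U : List String) (p q : String → Bool)
    (h : ∀ x, p x = true → q x = true) :
    (U.filter p).length ≤ (U.filter q).length := by
  induction U with
  | nil => simp
  | cons u U ih =>
    by_cases hp : p u = true
    · simp [hp, h u hp]; omega
    · simp only [List.filter_cons]
      by_cases hq : q u = true <;> simp [hp, hq] <;> omega

theorem pvLenFilterLt (U : List String) (p q : String → Bool)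
    (h : ∀ x, p x = true → q x = true) (w : String) (hwU : w ∈ U)
    (hwp : p w = false) (hwq : q w = true) :
    (U.filter p).length < (U.filter q).length := by
  induction U with
  | nil => cases hwU
  | cons u U ih =>
    rcases List.mem_cons.mp hwU with rfl | hwU
    · simp only [List.filter_cons, hwp, hwq]
      simpa using Nat.lt_succ_of_le (pvLenFilterMono U p q h)
    · have := ih hwU
      by_cases hp : p u = true
      · simp [hp, h u hp]; omega
      · simp only [List.filter_cons]
        by_cases hq : q u = true <;> simp [hp, hq] <;> omega

theorem pvFoldMeas (U preds : List String) (hU : ∀ p ∈ preds, p ∈ U) :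
    ∀ r acc : List String,
    2 * (U.filter (fun x => decide (x ∉ (preds.foldl pvVisit (r, acc)).1))).length
      + (preds.foldl pvVisit (r, acc)).2.length
    ≤ 2 * (U.filter (fun x => decide (x ∉ r))).length + acc.length := by
  induction preds with
  | nil => intro r acc; simp
  | cons p preds ih =>
    intro r acc
    have hU' : ∀ p' ∈ preds, p' ∈ U := fun p' hp' => hU p' (List.mem_cons_of_mem _ hp')
    simp only [List.foldl_cons]
    by_cases hp : p ∈ r
    · simpa [pvVisit, hp] using ih hU' r acc
    · have key : (U.filter (fun x => decide (x ∉ r ++ [p]))).length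
          < (U.filter (fun x => decide (x ∉ r))).length := by
        apply pvLenFilterLt U _ _ _ p (hU p (List.mem_cons_self ..))
        · simp
        · simp [hp]
        · intro x hx
          simp only [decide_eq_true_eq] at hx ⊢
          intro hxr; exact hx (List.mem_append_left _ hxr)
      have hv : pvVisit (r, acc) p = (r ++ [p], acc ++ [p]) := by
        simp [pvVisit, hp]
      simp only [hv]
      have := ih hU' (r ++ [p]) (acc ++ [p])
      simp only [List.length_append, List.length_cons, List.length_nil] at *
      omega

theorem pvGetDMemFlatten (d : PySem.Dict String (List String)) (n p : String)
    (h : p ∈ d.getD n []) : p ∈ d.values.flatten := by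
  rcases d with ⟨items⟩
  induction items with
  | nil => simp [PySem.Dict.getD, PySem.Dict.get?] at h
  | cons kv rest ih =>
    rw [PySem.Dict.getD_eq_get?_getD, PySem.Dict.get?_mk_cons] at h
    by_cases hk : (kv.1 == n) = true
    · simp only [hk, if_pos] at h
      simp only [Option.getD_some] at h
      exact List.mem_flatten.mpr ⟨kv.2, by simp [PySem.Dict.values], h⟩
    · simp only [hk, if_neg, Bool.false_eq_true, not_false_iff] at h
      rw [← PySem.Dict.getD_eq_get?_getD] at h
      have := ih h
      simp only [PySem.Dict.values, List.map_cons, List.flatten_cons, List.mem_append]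
      right
      simpa [PySem.Dict.values] using this

-- A's BFS while-loop over the queue q
def pvBFS (rev : PySem.Dict String (List String)) (reach : PySem.Set String)
    (q : List String) : PySem.Set String :=
  match q with
  | [] => reach
  | n :: q' =>
    let st := (rev.getD n []).foldl pvVisit (reach, [])
    pvBFS rev st.1 (q' ++ st.2)
termination_by 2 * ((rev.values.flatten).filter (fun x => decide (x ∉ reach))).length + q.length
decreasing_by
  have h := pvFoldMeas rev.values.flatten (rev.getD n [])
      (fun p hp => pvGetDMemFlatten rev n p hp) reach []
  simp only [List.length_nil] at h
  simp only [List.length_append, List.length_cons]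
  omega

def compute_dead_ends (passages : List String) (graph : List (String × List String)) :
    List String × List String :=
  let endings := passages.filter (fun p => PySem.Str.startswith p "Ending-")
  if endings = [] then (endings, PySem.List.sorted passages (fun x => x) false)
  else
    let rev : PySem.Dict String (List String) :=
      graph.foldl (fun rev st =>
        st.2.foldl (fun rev t => rev.modify t [] (fun l => l ++ [st.1])) rev)
        PySem.Dict.empty
    let can_reach := pvBFS rev (PySem.Set.ofList endings) endings
    (endings,
     PySem.List.sorted (passages.filter (fun p => decide (p ∉ can_reach))) (fun x => x) false)

-- ===== PORT B =====
-- one full forward sweep over the graph: "for src, tgts in graph.items(): …"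
def pvSweep (graph : List (String × List String)) (reach : PySem.Set String) :
    PySem.Set String :=
  graph.foldl (fun reach st =>
    if ¬ st.1 ∈ reach ∧ st.2.any (fun t => decide (t ∈ reach)) then
      PySem.Set.add reach st.1
    else reach) reach

def compute_dead_ends_alt (passages : List String) (graph : List (String × List String)) :
    List String × List String :=
  let endings := passages.filter (fun p => PySem.Str.startswith p "Ending-")
  if endings = [] then (endings, PySem.List.sorted passages (fun x => x) false)
  else
    let reach := (List.range graph.length).foldl (fun reach _ => pvSweep graph reach)
      (PySem.Set.ofList endings)
    (endings,
     PySem.List.sorted (passages.filter (fun p => decide (p ∉ reach))) (fun x => x) false)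

-- ===== PRECONDITION & SPEC =====
def Spec_compute_dead_ends (passages : List String) (graph : List (String × List String)) (out : List String × List String) : Prop := out = compute_dead_ends_alt passages graph
instance (passages : List String) (graph : List (String × List String)) (out : List String × List String) : Decidable (Spec_compute_dead_ends passages graph out) := by unfold Spec_compute_dead_ends; infer_instance

-- ===== CLAIM (what is proved, stated in full; the proofs are below) =====
def Claim_equal_compute_dead_ends : Prop := ∀ (passages : List String) (graph : List (String × List String)), Dom_compute_dead_ends passages graph → Spec_compute_dead_ends passages graph (compute_dead_ends passages graph)

-- ===== LEMMAS AND PROOFS =====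

-- the edge relation of the story graph, and reachability to the ending set E
def pvEdge (graph : List (String × List String)) (src t : String) : Prop :=
  ∃ tgts, (src, tgts) ∈ graph ∧ t ∈ tgts

inductive pvR (graph : List (String × List String)) (E : List String) : String → Prop
  | base {x : String} : x ∈ E → pvR graph E x
  | step {src t : String} : pvEdge graph src t → pvR graph E t → pvR graph E src

-- ---- A side: rev characterization ----
theorem pvFoldlFlatMap {α β γ : Type} (g : α → β → α) (f : γ → List β) :
    ∀ (l : List γ) (init : α),
    l.foldl (fun d st => (f st).foldl g d) init = (l.flatMap f).foldl g init := by
  intro l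
  induction l with
  | nil => intro init; simp
  | cons st l ih => intro init; simp [List.foldl_append, ih]

theorem pvRevChar (graph : List (String × List String)) (p t : String) :
    p ∈ (graph.foldl (fun rev st =>
        st.2.foldl (fun rev t => rev.modify t [] (fun l => l ++ [st.1])) rev)
        PySem.Dict.empty).getD t []
    ↔ pvEdge graph p t := by
  have hinner : ∀ (st : String × List String) (d : PySem.Dict String (List String)),
      st.2.foldl (fun rev t => rev.modify t [] (fun l => l ++ [st.1])) d
      = (st.2.map (fun t => (t, st.1))).foldl
          (fun d pr => d.modify pr.1 [] (fun l => l ++ [pr.2])) d := by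
    intro st d; rw [List.foldl_map]
  have hout : (graph.foldl (fun rev st =>
        st.2.foldl (fun rev t => rev.modify t [] (fun l => l ++ [st.1])) rev)
        PySem.Dict.empty)
      = (graph.flatMap (fun st => st.2.map (fun t => (t, st.1)))).foldl
          (fun d pr => d.modify pr.1 [] (fun l => l ++ [pr.2])) PySem.Dict.empty := by
    rw [← pvFoldlFlatMap]
    exact PySem.List.foldl_congr_mem graph _ _ _ (fun d st _ => hinner st d)
  rw [hout, PySem.Dict.getD_foldl_modify_append]
  simp [pvEdge, List.mem_filter, List.mem_flatMap, PySem.Dict.getD_empty]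

-- ---- A side: BFS inner-fold membership ----
theorem pvFoldMem (preds : List String) : ∀ r acc : List String,
    (∀ x, x ∈ (preds.foldl pvVisit (r, acc)).1 ↔ x ∈ r ∨ x ∈ preds) ∧
    (∀ x, x ∈ (preds.foldl pvVisit (r, acc)).2 ↔ x ∈ acc ∨ (x ∈ preds ∧ x ∉ r)) := by
  induction preds with
  | nil => intro r acc; simp
  | cons p preds ih =>
    intro r acc
    simp only [List.foldl_cons]
    by_cases hp : p ∈ r
    · have hv : pvVisit (r, acc) p = (r, acc) := by simp [pvVisit, hp]
      rw [hv]
      obtain ⟨ih1, ih2⟩ := ih r acc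
      constructor
      · intro x
        rw [ih1 x]
        simp only [List.mem_cons]
        constructor
        · tauto
        · rintro (hx | rfl | hx) <;> tauto
      · intro x
        rw [ih2 x]
        simp only [List.mem_cons]
        constructor
        · tauto
        · rintro (hx | ⟨rfl | hx, hxr⟩) <;> tauto
    · have hv : pvVisit (r, acc) p = (r ++ [p], acc ++ [p]) := by
        simp [pvVisit, hp, PySem.Set.add, PySem.Set.contains]
      rw [hv]
      obtain ⟨ih1, ih2⟩ := ih (r ++ [p]) (acc ++ [p])
      constructor
      · intro x
        rw [ih1 x]
        simp only [List.mem_append, List.mem_cons, List.not_mem_nil, or_false]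
        tauto
      · intro x
        rw [ih2 x]
        simp only [List.mem_append, List.mem_cons, List.not_mem_nil, or_false]
        constructor
        · rintro ((hx | rfl) | ⟨hx, hxr⟩)
          · tauto
          · exact Or.inr ⟨Or.inl rfl, hp⟩
          · exact Or.inr ⟨Or.inr hx, fun hr => hxr (Or.inl hr)⟩
        · rintro (hx | ⟨rfl | hx, hxr⟩)
          · tauto
          · tauto
          · by_cases hxp : x = p
            · tauto
            · exact Or.inr ⟨hx, by tauto⟩

-- ---- A side: BFS invariant proof ----
theorem pvBFS_spec (graph : List (String × List String)) (E : List String)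
    (rev : PySem.Dict String (List String))
    (hrev : ∀ p t, p ∈ rev.getD t [] ↔ pvEdge graph p t) :
    ∀ (reach : PySem.Set String) (q : List String),
      (∀ x ∈ q, x ∈ reach) →
      (∀ x ∈ reach, pvR graph E x) →
      (∀ x ∈ reach, x ∈ q ∨ ∀ p, pvEdge graph p x → p ∈ reach) →
      (∀ x ∈ reach, x ∈ pvBFS rev reach q) ∧
      (∀ x ∈ pvBFS rev reach q, pvR graph E x) ∧
      (∀ x ∈ pvBFS rev reach q, ∀ p, pvEdge graph p x → p ∈ pvBFS rev reach q) := by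
  intro reach q
  induction reach, q using pvBFS.induct rev with
  | case1 reach =>
    intro _ hR hcl
    rw [pvBFS]
    exact ⟨fun x hx => hx, hR, fun x hx p hpx => by
      rcases hcl x hx with h | h
      · cases h
      · exact h p hpx⟩
  | case2 reach n q' _st ih =>
    intro hq hR hcl
    obtain ⟨hm1, hm2⟩ := pvFoldMem (rev.getD n []) reach []
    rw [pvBFS]
    have hsub : ∀ x ∈ reach, x ∈ (List.foldl pvVisit (reach, []) (rev.getD n [])).1 :=
      fun x hx => (hm1 x).mpr (Or.inl hx)
    have hRn : pvR graph E n := hR n (hq n (List.mem_cons_self ..))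
    have hinv1 : ∀ x ∈ q' ++ (List.foldl pvVisit (reach, []) (rev.getD n [])).2,
        x ∈ (List.foldl pvVisit (reach, []) (rev.getD n [])).1 := by
      intro x hx
      rcases List.mem_append.mp hx with hx | hx
      · exact hsub x (hq x (List.mem_cons_of_mem _ hx))
      · exact (hm1 x).mpr (Or.inr (((hm2 x).mp hx).resolve_left (by simp)).1)
    have hinv2 : ∀ x ∈ (List.foldl pvVisit (reach, []) (rev.getD n [])).1, pvR graph E x := by
      intro x hx
      rcases (hm1 x).mp hx with hx | hx
      · exact hR x hx
      · exact pvR.step ((hrev x n).mp hx) hRn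
    have hinv3 : ∀ x ∈ (List.foldl pvVisit (reach, []) (rev.getD n [])).1,
        x ∈ q' ++ (List.foldl pvVisit (reach, []) (rev.getD n [])).2 ∨
        ∀ p, pvEdge graph p x → p ∈ (List.foldl pvVisit (reach, []) (rev.getD n [])).1 := by
      intro x hx
      rcases (hm1 x).mp hx with hxr | hxp
      · rcases hcl x hxr with hxq | hxc
        · rcases List.mem_cons.mp hxq with rfl | hxq'
          · -- x = n has just been processed: all its rev-neighbours are in the new reach
            right
            intro p hpx
            exact (hm1 p).mpr (Or.inr ((hrev p x).mpr hpx))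
          · exact Or.inl (List.mem_append_left _ hxq')
        · exact Or.inr fun p hpx => hsub p (hxc p hpx)
      · by_cases hxr : x ∈ reach
        · rcases hcl x hxr with hxq | hxc
          · rcases List.mem_cons.mp hxq with rfl | hxq'
            · right
              intro p hpx
              exact (hm1 p).mpr (Or.inr ((hrev p x).mpr hpx))
            · exact Or.inl (List.mem_append_left _ hxq')
          · exact Or.inr fun p hpx => hsub p (hxc p hpx)
        · exact Or.inl (List.mem_append_right _ ((hm2 x).mpr (Or.inr ⟨hxp, hxr⟩)))
    obtain ⟨c1, c2, c3⟩ := ih hinv1 hinv2 hinv3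
    exact ⟨fun x hx => c1 x (hsub x hx), c2, c3⟩

theorem pvBFS_char (graph : List (String × List String)) (E : List String)
    (rev : PySem.Dict String (List String))
    (hrev : ∀ p t, p ∈ rev.getD t [] ↔ pvEdge graph p t) (x : String) :
    x ∈ pvBFS rev (PySem.Set.ofList E) E ↔ pvR graph E x := by
  obtain ⟨c1, c2, c3⟩ := pvBFS_spec graph E rev hrev (PySem.Set.ofList E) E
    (fun x hx => (PySem.Set.mem_ofList E x).mpr hx)
    (fun x hx => pvR.base ((PySem.Set.mem_ofList E x).mp hx))
    (fun x hx => Or.inl ((PySem.Set.mem_ofList E x).mp hx))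
  constructor
  · exact c2 x
  · intro hR
    induction hR with
    | base hx => exact c1 _ ((PySem.Set.mem_ofList E _).mpr hx)
    | step he _ ih => exact c3 _ ih _ he

-- ---- B side: sweep lemmas ----
theorem pvSweepGrowsAux (l : List (String × List String)) :
    ∀ (S : PySem.Set String) (x : String), x ∈ S →
    x ∈ l.foldl (fun reach st =>
      if ¬ st.1 ∈ reach ∧ st.2.any (fun t => decide (t ∈ reach)) then
        PySem.Set.add reach st.1
      else reach) S := by
  induction l with
  | nil => intro S x hx; exact hx
  | cons st l ih =>
    intro S x hx
    simp only [List.foldl_cons]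
    apply ih
    by_cases hc : ¬ st.1 ∈ S ∧ st.2.any (fun t => decide (t ∈ S))
    · rw [if_pos hc]
      exact (PySem.Set.mem_add S st.1 x).mpr (Or.inl hx)
    · rwa [if_neg hc]

theorem pvSweepSoundAux (graph : List (String × List String)) (E : List String) :
    ∀ (l : List (String × List String)), (∀ st ∈ l, st ∈ graph) →
    ∀ (S : PySem.Set String), (∀ x ∈ S, pvR graph E x) →
    ∀ x ∈ l.foldl (fun reach st =>
      if ¬ st.1 ∈ reach ∧ st.2.any (fun t => decide (t ∈ reach)) then
        PySem.Set.add reach st.1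
      else reach) S, pvR graph E x := by
  intro l
  induction l with
  | nil => intro _ S hS x hx; exact hS x hx
  | cons st l ih =>
    intro hl S hS
    simp only [List.foldl_cons]
    apply ih (fun st' hst' => hl st' (List.mem_cons_of_mem _ hst'))
    by_cases hc : ¬ st.1 ∈ S ∧ st.2.any (fun t => decide (t ∈ S))
    · rw [if_pos hc]
      intro x hx
      rcases (PySem.Set.mem_add S st.1 x).mp hx with hx | rfl
      · exact hS x hx
      · obtain ⟨t, ht, htS⟩ := List.any_eq_true.mp hc.2
        exact pvR.step ⟨st.2, hl st (List.mem_cons_self ..), ht⟩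
          (hS t (of_decide_eq_true htS))
    · rwa [if_neg hc]

theorem pvSweepExtAux (l : List (String × List String)) :
    ∀ (S T : PySem.Set String), (∀ x, x ∈ S ↔ x ∈ T) →
    ∀ x, x ∈ l.foldl (fun reach st =>
      if ¬ st.1 ∈ reach ∧ st.2.any (fun t => decide (t ∈ reach)) then
        PySem.Set.add reach st.1
      else reach) S ↔ x ∈ l.foldl (fun reach st =>
      if ¬ st.1 ∈ reach ∧ st.2.any (fun t => decide (t ∈ reach)) then
        PySem.Set.add reach st.1
      else reach) T := by
  induction l with
  | nil => intro S T h x; exact h x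
  | cons st l ih =>
    intro S T h x
    simp only [List.foldl_cons]
    apply ih
    have hcond : (¬ st.1 ∈ S ∧ st.2.any (fun t => decide (t ∈ S))) ↔
        (¬ st.1 ∈ T ∧ st.2.any (fun t => decide (t ∈ T))) := by
      rw [h st.1]
      simp only [List.any_eq_true, decide_eq_true_eq]
      constructor
      · rintro ⟨h1, t, ht, htS⟩; exact ⟨h1, t, ht, (h t).mp htS⟩
      · rintro ⟨h1, t, ht, htT⟩; exact ⟨h1, t, ht, (h t).mpr htT⟩
    by_cases hc : ¬ st.1 ∈ S ∧ st.2.any (fun t => decide (t ∈ S))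
    · rw [if_pos hc, if_pos (hcond.mp hc)]
      intro y
      rw [PySem.Set.mem_add, PySem.Set.mem_add, h y]
    · rw [if_neg hc, if_neg (fun hT => hc (hcond.mpr hT))]
      exact h

theorem pvSweepKeysAux (l : List (String × List String)) :
    ∀ (S : PySem.Set String) (x : String),
    x ∈ l.foldl (fun reach st =>
      if ¬ st.1 ∈ reach ∧ st.2.any (fun t => decide (t ∈ reach)) then
        PySem.Set.add reach st.1
      else reach) S → x ∈ S ∨ x ∈ l.map (·.1) := by
  induction l with
  | nil => intro S x hx; exact Or.inl hx
  | cons st l ih =>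
    intro S x hx
    simp only [List.foldl_cons] at hx
    rcases ih _ x hx with hx' | hx'
    · by_cases hc : ¬ st.1 ∈ S ∧ st.2.any (fun t => decide (t ∈ S))
      · rw [if_pos hc] at hx'
        rcases (PySem.Set.mem_add S st.1 x).mp hx' with hx'' | rfl
        · exact Or.inl hx''
        · exact Or.inr (by simp)
      · rw [if_neg hc] at hx'
        exact Or.inl hx'
    · exact Or.inr (List.mem_cons_of_mem _ hx')

theorem pvSweepClosedOfFix (graph : List (String × List String))
    (S : PySem.Set String) (h : ∀ x, x ∈ pvSweep graph S ↔ x ∈ S) :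
    ∀ st ∈ graph, ∀ t ∈ st.2, t ∈ S → st.1 ∈ S := by
  intro st hst t ht htS
  obtain ⟨l1, l2, rfl⟩ := List.append_of_mem hst
  by_contra hsrc
  apply hsrc
  rw [← h st.1]
  unfold pvSweep
  rw [List.foldl_append, List.foldl_cons]
  apply pvSweepGrowsAux
  by_cases hc : ¬ st.1 ∈ l1.foldl (fun reach st =>
      if ¬ st.1 ∈ reach ∧ st.2.any (fun t => decide (t ∈ reach)) then
        PySem.Set.add reach st.1
      else reach) S ∧
      st.2.any (fun t => decide (t ∈ l1.foldl (fun reach st =>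
      if ¬ st.1 ∈ reach ∧ st.2.any (fun t => decide (t ∈ reach)) then
        PySem.Set.add reach st.1
      else reach) S))
  · rw [if_pos hc]
    exact (PySem.Set.mem_add _ st.1 st.1).mpr (Or.inr rfl)
  · rw [not_and_or, not_not] at hc
    rcases hc with hc | hc
    · rw [if_neg (by rw [not_and_or, not_not]; exact Or.inl hc)] ; exact hc
    · exfalso
      apply hc
      exact List.any_eq_true.mpr ⟨t, ht, decide_eq_true (pvSweepGrowsAux l1 S t htS)⟩

-- ---- B side: iteration ----
def pvIter (graph : List (String × List String)) (S0 : PySem.Set String) (k : Nat) :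
    PySem.Set String :=
  (List.range k).foldl (fun reach _ => pvSweep graph reach) S0

theorem pvIterSucc (graph : List (String × List String)) (S0 : PySem.Set String) (k : Nat) :
    pvIter graph S0 (k + 1) = pvSweep graph (pvIter graph S0 k) := by
  simp [pvIter, List.range_succ, List.foldl_append]

theorem pvIterGrows (graph : List (String × List String)) (S0 : PySem.Set String)
    (j k : Nat) (h : j ≤ k) : ∀ x, x ∈ pvIter graph S0 j → x ∈ pvIter graph S0 k := by
  induction k with
  | zero => intro x hx; rwa [Nat.le_zero.mp h] at hx
  | succ k ih =>
    intro x hx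
    rcases Nat.lt_or_ge j (k+1) with hk | hk
    · rw [pvIterSucc]
      exact pvSweepGrowsAux graph _ x (ih (Nat.lt_succ_iff.mp hk) x hx)
    · rwa [Nat.le_antisymm h hk] at hx

theorem pvSweepExt (graph : List (String × List String)) (S T : PySem.Set String)
    (h : ∀ x, x ∈ S ↔ x ∈ T) (x : String) :
    x ∈ pvSweep graph S ↔ x ∈ pvSweep graph T := by
  unfold pvSweep; exact pvSweepExtAux graph S T h x

theorem pvSweepKeys (graph : List (String × List String)) (S : PySem.Set String)
    (x : String) (hx : x ∈ pvSweep graph S) : x ∈ S ∨ x ∈ graph.map (·.1) := by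
  unfold pvSweep at hx; exact pvSweepKeysAux graph S x hx

theorem pvSweepSound (graph : List (String × List String)) (E : List String)
    (S : PySem.Set String) (hS : ∀ x ∈ S, pvR graph E x) :
    ∀ x ∈ pvSweep graph S, pvR graph E x := by
  unfold pvSweep
  exact pvSweepSoundAux graph E graph (fun _ h => h) S hS

theorem pvIterClosed (graph : List (String × List String)) (S0 : PySem.Set String) :
    ∀ st ∈ graph, ∀ t ∈ st.2, t ∈ pvIter graph S0 graph.length →
      st.1 ∈ pvIter graph S0 graph.length := by
  by_cases hex : ∃ k, k < graph.length ∧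
      ∀ x, (x ∈ pvIter graph S0 (k + 1) ↔ x ∈ pvIter graph S0 k)
  · obtain ⟨k, hk, hfix⟩ := hex
    have hstable : ∀ j x, x ∈ pvIter graph S0 (k + j) ↔ x ∈ pvIter graph S0 k := by
      intro j
      induction j with
      | zero => intro x; rfl
      | succ j ih =>
        intro x
        rw [show k + (j + 1) = (k + j) + 1 by omega, pvIterSucc,
          pvSweepExt graph _ _ ih x, show (x ∈ pvSweep graph (pvIter graph S0 k))
            = (x ∈ pvIter graph S0 (k + 1)) by rw [pvIterSucc]]
        exact hfix x
    have closedk : ∀ st ∈ graph, ∀ t ∈ st.2, t ∈ pvIter graph S0 k →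
        st.1 ∈ pvIter graph S0 k := by
      apply pvSweepClosedOfFix
      intro x
      have := hfix x
      rwa [pvIterSucc] at this
    have hnk : ∀ x, x ∈ pvIter graph S0 graph.length ↔ x ∈ pvIter graph S0 k := by
      intro x
      have := hstable (graph.length - k) x
      rwa [Nat.add_sub_cancel' (le_of_lt hk)] at this
    intro st hst t ht htn
    rw [hnk]
    exact closedk st hst t ht ((hnk t).mp htn)
  · push_neg at hex
    have hgrow : ∀ k, k < graph.length →
        ∃ x, x ∈ pvIter graph S0 (k + 1) ∧ x ∉ pvIter graph S0 k := by
      intro k hk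
      obtain ⟨x, hx⟩ := hex k hk
      rcases hx with ⟨h2, h1⟩ | ⟨h2, h1⟩
      · exact ⟨x, h2, h1⟩
      · exact absurd (pvIterGrows graph S0 k (k + 1) (Nat.le_succ k) x h1) h2
    have hmono : ∀ k, k ≤ graph.length → k ≤ ((graph.map (·.1)).dedup.filter
        (fun x => decide (x ∈ pvIter graph S0 k))).length := by
      intro k
      induction k with
      | zero => intro _; exact Nat.zero_le _
      | succ k ih =>
        intro hk
        have hk' : k < graph.length := hk
        obtain ⟨x, hx1, hx0⟩ := hgrow k hk'
        have hxK : x ∈ (graph.map (·.1)).dedup := by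
          have hx1' := hx1
          rw [pvIterSucc] at hx1'
          rcases pvSweepKeys graph _ x hx1' with h | h
          · exact absurd h hx0
          · exact List.mem_dedup.mpr h
        have hlt := pvLenFilterLt (graph.map (·.1)).dedup
          (fun x => decide (x ∈ pvIter graph S0 k))
          (fun x => decide (x ∈ pvIter graph S0 (k + 1)))
          (fun y hy => decide_eq_true
            (pvIterGrows graph S0 k (k + 1) (Nat.le_succ k) y (of_decide_eq_true hy)))
          x hxK (decide_eq_false hx0) (decide_eq_true hx1)
        have := ih (le_of_lt hk')
        omega
    have hKlen : (graph.map (·.1)).dedup.length ≤ graph.length := by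
      calc (graph.map (·.1)).dedup.length ≤ (graph.map (·.1)).length :=
            (List.dedup_sublist _).length_le
        _ = graph.length := List.length_map ..
    have hall : ∀ x ∈ (graph.map (·.1)).dedup, x ∈ pvIter graph S0 graph.length := by
      have h1 := hmono graph.length (le_refl _)
      have h2 := List.length_filter_le
        (fun x => decide (x ∈ pvIter graph S0 graph.length)) (graph.map (·.1)).dedup
      have heq : ((graph.map (·.1)).dedup.filter
          (fun x => decide (x ∈ pvIter graph S0 graph.length))).length
          = (graph.map (·.1)).dedup.length := le_antisymm h2 (le_trans hKlen h1)
      intro x hx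
      exact of_decide_eq_true (List.length_filter_eq_length_iff.mp heq x hx)
    intro st hst _t _ht _htn
    exact hall st.1 (List.mem_dedup.mpr (List.mem_map.mpr ⟨st, hst, rfl⟩))

theorem pvIterChar (graph : List (String × List String)) (E : List String) (x : String) :
    x ∈ pvIter graph (PySem.Set.ofList E) graph.length ↔ pvR graph E x := by
  constructor
  · have hsound : ∀ k x, x ∈ pvIter graph (PySem.Set.ofList E) k → pvR graph E x := by
      intro k
      induction k with
      | zero => intro x hx; exact pvR.base ((PySem.Set.mem_ofList E x).mp hx)
      | succ k ih =>
        intro x hx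
        rw [pvIterSucc] at hx
        exact pvSweepSound graph E _ ih x hx
    exact hsound graph.length x
  · intro hR
    induction hR with
    | base hx =>
      exact pvIterGrows graph _ 0 graph.length (Nat.zero_le _) _
        ((PySem.Set.mem_ofList E _).mpr hx)
    | step he _ ih =>
      obtain ⟨tgts, hmem, ht⟩ := he
      exact pvIterClosed graph _ (_, tgts) hmem _ ht ih

-- ===== VERDICT (by name: the statement is the Claim_ definition above) =====
theorem compute_dead_ends_spec : Claim_equal_compute_dead_ends := by
  intro passages graph _
  show compute_dead_ends passages graph = compute_dead_ends_alt passages graph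
  simp only [compute_dead_ends, compute_dead_ends_alt]
  by_cases h : passages.filter (fun p => PySem.Str.startswith p "Ending-") = []
  · rw [if_pos h, if_pos h]
  · rw [if_neg h, if_neg h]
    congr 1
    congr 1
    apply List.filter_congr
    intro p _
    have h1 := pvBFS_char graph (passages.filter (fun p => PySem.Str.startswith p "Ending-"))
      _ (pvRevChar graph) p
    have h2 := pvIterChar graph (passages.filter (fun p => PySem.Str.startswith p "Ending-")) p
    simp only [pvIter] at h2
    simp only [decide_eq_decide]
    rw [not_iff_not, h1, ← h2]
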